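-- pv_equiv track=rewrite | github.com/slam3085/adventofcode_2023 | 5/5.py | apply_map_2
-- ===== SOURCE A (Python) =====
-- def find_intersection(c_start, c_range_length, source_range_start, range_length):
-- 	c_end = c_start + c_range_length - 1
-- 	source_range_end = source_range_start + range_length - 1
-- 	intersection_start = max(c_start, source_range_start)
-- 	intersection_end = min(c_end, source_range_end)
-- 	if intersection_start <= intersection_end:
-- 		intersection_range_length = intersection_end - intersection_start + 1
-- 		return (intersection_start, intersection_range_length)
-- 	else:
-- 		return None
--
-- def apply_map_2(current, _map):
-- 	res = []
-- 	for c_start, c_range_length in current: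
-- 		transformed = []
-- 		_map.sort(key=lambda x: x[1])
--
-- 		for dest_range_start, source_range_start, range_length in _map:
-- 			intersection = find_intersection(c_start, c_range_length, source_range_start, range_length)
-- 			if intersection:
-- 				intersection_start, intersection_range_length = intersection
-- 				if intersection_start != c_start:
-- 					transformed_start = c_start
-- 					transformed_range_length = intersection_start - c_start
-- 					if transformed_range_length > 0:
-- 						transformed.append((transformed_start, transformed_range_length))
-- 						c_start += transformed_range_length
-- 						c_range_length -= transformed_range_length
-- 				transformed_start = dest_range_start + c_start - source_range_start
-- 				transformed_range_length = intersection_range_length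
-- 				transformed.append((transformed_start, transformed_range_length))
-- 				c_start += intersection_range_length
-- 				c_range_length -= intersection_range_length
-- 		if c_range_length > 0:
-- 			transformed.append((c_start, c_range_length))
-- 		res += transformed
-- 	return res
-- ===== SOURCE B (Python) =====
-- def apply_map_2(current, _map):
--     # Stage 1: compile the (possibly overlapping) mapping table into a disjoint,
--     # sorted offset table: earlier-sorted entries win, each entry keeps at most a
--     # contiguous suffix of its source range.  (_map is sorted in place like in the
--     # original, so the caller-visible mutation is identical.)
--     _map.sort(key=lambda x: x[1])
--     segs = []  # (lo, hi, offset) with lo < hi <= next lo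
--     cov = None
--     for dest, src, rl in _map:
--         lo = src if cov is None else (cov if cov > src else src)
--         if lo < src + rl:
--             segs.append((lo, src + rl, dest - src))
--             cov = src + rl
--
--     # Stage 2: each interval binary-searches the first segment that can still
--     # overlap it and walks the contiguous overlapping run.
--     res = []
--     for s, l in current:
--         if l <= 0:
--             continue
--         e = s + l
--         # first index whose segment end is past s
--         i, j = 0, len(segs)
--         while i < j:
--             mid = (i + j) // 2
--             if segs[mid][1] > s:
--                 j = mid
--             else:
--                 i = mid + 1
--         for lo, hi, off in segs[i:]:
--             if lo >= e:
--                 break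
--             a = lo if lo > s else s
--             b = hi if hi < e else e
--             if a < b:
--                 if a > s:
--                     res.append((s, a - s))
--                 res.append((a + off, b - a))
--                 s = b
--         if e - s > 0:
--             res.append((s, e - s))
--     return res
-- ===== Notes on version B (the rewrite author's own statement) =====
-- stated objective: faster
-- what changed: B first compiles the mapping table once into a disjoint sorted offset table (earlier-sorted entries win, overlaps cut away), then for each interval binary-searches the first overlapping segment and walks only the contiguous overlapping run, instead of A's re-sorting the whole map and scanning every entry for every interval.
import Mathlib
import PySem

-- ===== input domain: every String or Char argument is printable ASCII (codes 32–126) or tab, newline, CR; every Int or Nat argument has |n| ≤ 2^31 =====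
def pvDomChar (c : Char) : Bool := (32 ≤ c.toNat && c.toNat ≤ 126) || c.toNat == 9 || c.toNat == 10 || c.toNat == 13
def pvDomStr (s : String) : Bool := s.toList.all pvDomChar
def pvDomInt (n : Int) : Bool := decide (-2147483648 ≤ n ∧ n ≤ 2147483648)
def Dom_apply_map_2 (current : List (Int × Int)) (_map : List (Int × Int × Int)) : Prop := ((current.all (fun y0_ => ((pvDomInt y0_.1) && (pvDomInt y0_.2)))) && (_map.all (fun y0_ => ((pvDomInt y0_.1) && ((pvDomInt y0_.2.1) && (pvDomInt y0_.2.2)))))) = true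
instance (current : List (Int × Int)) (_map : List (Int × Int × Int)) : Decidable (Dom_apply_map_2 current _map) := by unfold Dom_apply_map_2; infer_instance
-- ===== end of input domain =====

-- ===== PORT A =====
-- B precompiles the map into a disjoint sorted offset table and binary-searches per
-- interval (objective: faster). Both A and B sort _map in place in Python; the
-- equivalence proved here is about the return value (the mutation of _map is identical).
def findIntersection (c_start c_range_length source_range_start range_length : Int) :
    Option (Int × Int) :=
  let c_end := c_start + c_range_length - 1
  let source_range_end := source_range_start + range_length - 1
  let intersection_start := max c_start source_range_start
  let intersection_end := min c_end source_range_end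
  if intersection_start ≤ intersection_end then
    some (intersection_start, intersection_end - intersection_start + 1)
  else
    none

-- A's inner `for ... in _map` loop: state (c_start, c_range_length, transformed)
def applyMapInner (m : List (Int × Int × Int)) (c_start c_range_length : Int)
    (transformed : List (Int × Int)) : Int × Int × List (Int × Int) :=
  match m with
  | [] => (c_start, c_range_length, transformed)
  | (dest, src, rl) :: rest =>
    match findIntersection c_start c_range_length src rl with
    | some (is, irl) =>
      let st :=
        if is ≠ c_start then
          let g := is - c_start
          if g > 0 then (c_start + g, c_range_length - g, transformed ++ [(c_start, g)])
          else (c_start, c_range_length, transformed)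
        else (c_start, c_range_length, transformed)
      applyMapInner rest (st.1 + irl) (st.2.1 - irl) (st.2.2 ++ [(dest + st.1 - src, irl)])
    | none => applyMapInner rest c_start c_range_length transformed

def apply_map_2 (current : List (Int × Int)) (_map : List (Int × Int × Int)) :
    List (Int × Int) :=
  (current.foldl
    (fun (st : List (Int × Int) × List (Int × Int × Int)) c =>
      let m := PySem.List.sorted st.2 (fun x => x.2.1) false
      let r := applyMapInner m c.1 c.2 []
      (st.1 ++ (r.2.2 ++ (if r.2.1 > 0 then [(r.1, r.2.1)] else [])), m))
    ([], _map)).1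

-- ===== PORT B =====
-- Source B's `lo = src if cov is None else (cov if cov > src else src)`
def covLo (cov : Option Int) (src : Int) : Int :=
  match cov with
  | none => src
  | some c => if c > src then c else src

-- Stage 1 of Source B: compile the sorted map into a disjoint offset table (first entry wins)
def buildSegs (m : List (Int × Int × Int)) (cov : Option Int)
    (segs : List (Int × Int × Int)) : List (Int × Int × Int) :=
  match m with
  | [] => segs
  | (dest, src, rl) :: rest =>
    let lo := covLo cov src
    if lo < src + rl then buildSegs rest (some (src + rl)) (segs ++ [(lo, src + rl, dest - src)])
    else buildSegs rest cov segs

-- Source B's hand-rolled binary search: first index i with segs[i][1] > s.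
-- `fuel` only makes the loop total (it strictly shrinks j - i, so fuel = segs.length suffices).
def firstOverlap (segs : List (Int × Int × Int)) (s : Int) : Nat → Nat → Nat → Nat
  | 0, i, _ => i
  | fuel + 1, i, j =>
    if i < j then
      match segs[(i + j) / 2]? with
      | some (_, hi, _) =>
        if hi > s then firstOverlap segs s fuel i ((i + j) / 2)
        else firstOverlap segs s fuel ((i + j) / 2 + 1) j
      | none => i
    else i

-- Source B's `for lo, hi, off in segs[i:]` walk over the overlapping run (break on lo >= e)
def scanRun (segs : List (Int × Int × Int)) (e s : Int) (res : List (Int × Int)) :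
    Int × List (Int × Int) :=
  match segs with
  | [] => (s, res)
  | (lo, hi, off) :: rest =>
    if lo < e then
      let a := if lo > s then lo else s
      let b := if hi < e then hi else e
      if a < b then
        scanRun rest e b ((if a > s then res ++ [(s, a - s)] else res) ++ [(a + off, b - a)])
      else scanRun rest e s res
    else (s, res)

def apply_map_2_alt (current : List (Int × Int)) (_map : List (Int × Int × Int)) :
    List (Int × Int) :=
  let m := PySem.List.sorted _map (fun x => x.2.1) false
  let segs := buildSegs m none []
  current.foldl
    (fun res c =>
      if c.2 ≤ 0 then res
      else
        let e := c.1 + c.2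
        let i := firstOverlap segs c.1 segs.length 0 segs.length
        let r := scanRun (segs.drop i) e c.1 res
        if e - r.1 > 0 then r.2 ++ [(r.1, e - r.1)] else r.2)
    []

-- ===== PRECONDITION & SPEC =====
def Spec_apply_map_2 (current : List (Int × Int)) (_map : List (Int × Int × Int)) (out : List (Int × Int)) : Prop := out = apply_map_2_alt current _map
instance (current : List (Int × Int)) (_map : List (Int × Int × Int)) (out : List (Int × Int)) : Decidable (Spec_apply_map_2 current _map out) := by unfold Spec_apply_map_2; infer_instance

-- ===== CLAIM (what is proved, stated in full; the proofs are below) =====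
def Claim_equal_apply_map_2 : Prop := ∀ (current : List (Int × Int)) (_map : List (Int × Int × Int)), Dom_apply_map_2 current _map → Spec_apply_map_2 current _map (apply_map_2 current _map)

-- ===== LEMMAS AND PROOFS =====

theorem buildSegs_acc (m : List (Int × Int × Int)) :
    ∀ (cov : Option Int) (segs : List (Int × Int × Int)),
      buildSegs m cov segs = segs ++ buildSegs m cov [] := by
  induction m with
  | nil => intro cov segs; simp [buildSegs]
  | cons hd rest ih =>
    intro cov segs
    obtain ⟨dest, src, rl⟩ := hd
    simp only [buildSegs]
    split_ifs with h
    · rw [ih _ (segs ++ _), ih _ ([] ++ _)]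
      simp
    · exact ih cov segs

-- the compiled table is strictly ordered and disjoint, and starts past cov
theorem buildSegs_chain (m : List (Int × Int × Int)) :
    ∀ (cov : Option Int),
      (buildSegs m cov []).Pairwise (fun x y => x.2.1 ≤ y.1) ∧
      (∀ x ∈ buildSegs m cov [], x.1 < x.2.1 ∧ ∀ c, cov = some c → c ≤ x.1) := by
  induction m with
  | nil => intro cov; simp [buildSegs]
  | cons hd rest ih =>
    intro cov
    obtain ⟨dest, src, rl⟩ := hd
    simp only [buildSegs]
    split_ifs with h
    · rw [buildSegs_acc]
      simp only [List.nil_append, List.singleton_append]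
      obtain ⟨ihp, ihm⟩ := ih (some (src + rl))
      refine ⟨List.pairwise_cons.mpr ⟨fun y hy => (ihm y hy).2 _ rfl, ihp⟩, ?_⟩
      intro x hx
      rcases List.mem_cons.mp hx with hx1 | hx1
      · subst hx1
        refine ⟨h, ?_⟩
        intro c hc
        subst hc
        simp only [covLo]
        split_ifs <;> omega
      · refine ⟨(ihm x hx1).1, ?_⟩
        intro c hc
        subst hc
        have h2 := (ihm x hx1).2 (src + rl) rfl
        simp only [covLo] at h
        split_ifs at h <;> omega
    · exact ih cov

-- segment ends are monotone along the table
theorem chain_hi_mono (segs : List (Int × Int × Int))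
    (hch : segs.Pairwise (fun x y => x.2.1 ≤ y.1))
    (hlt : ∀ x ∈ segs, x.1 < x.2.1) :
    ∀ (p q : Nat) (hpq : p < q) (hq : q < segs.length),
      (segs[p]'(by omega)).2.1 ≤ (segs[q]'hq).2.1 := by
  intro p q hpq hq
  have h1 := (List.pairwise_iff_getElem.mp hch) p q (by omega) hq hpq
  have h2 := (hlt (segs[q]'hq) (segs.getElem_mem hq)).le
  exact le_trans h1 h2

-- the binary search only skips segments ending at or before s
theorem firstOverlap_prop (segs : List (Int × Int × Int)) (s : Int)
    (hmono : ∀ (p q : Nat) (hpq : p < q) (hq : q < segs.length),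
      (segs[p]'(by omega)).2.1 ≤ (segs[q]'hq).2.1) :
    ∀ (fuel i j : Nat), (∀ (k : Nat) (hk : k < segs.length), k < i → (segs[k]'hk).2.1 ≤ s) →
      ∀ (k : Nat) (hk : k < segs.length), k < firstOverlap segs s fuel i j →
        (segs[k]'hk).2.1 ≤ s := by
  intro fuel
  induction fuel with
  | zero => intro i j hpre; exact hpre
  | succ fuel ih =>
    intro i j hpre
    simp only [firstOverlap]
    by_cases hij : i < j
    · rw [if_pos hij]
      cases _hm : segs[(i + j) / 2]? with
      | none => exact hpre
      | some x =>
        obtain ⟨f, hv, t⟩ := x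
        dsimp only
        have hmid : (i + j) / 2 < segs.length := by
          by_contra hc
          rw [List.getElem?_eq_none (by omega)] at _hm
          simp at _hm
        have hval : (segs[(i + j) / 2]'hmid).2.1 = hv := by
          rw [List.getElem?_eq_getElem hmid] at _hm
          simp at _hm
          rw [_hm]
        by_cases hgt : hv > s
        · rw [if_pos hgt]
          exact ih i ((i + j) / 2) hpre
        · rw [if_neg hgt]
          refine ih ((i + j) / 2 + 1) j ?_
          intro k hk hki
          rcases Nat.lt_or_ge k ((i + j) / 2) with hlt2 | hge
          · exact le_trans (hmono k ((i + j) / 2) hlt2 hmid) (by omega)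
          · have : k = (i + j) / 2 := by omega
            subst this
            omega
    · rw [if_neg hij]
      exact hpre

-- skipping segments that end at or before s does not change the walk
theorem scanRun_skip (e : Int) :
    ∀ (segs : List (Int × Int × Int)), segs.Pairwise (fun x y => x.2.1 ≤ y.1) →
      (∀ x ∈ segs, x.1 < x.2.1) →
      ∀ (i : Nat) (s : Int) (res : List (Int × Int)),
        (∀ (k : Nat) (hk : k < segs.length), k < i → (segs[k]'hk).2.1 ≤ s) →
        scanRun segs e s res = scanRun (segs.drop i) e s res := by
  intro segs hch hlt
  induction segs with
  | nil => intro i s res _; simp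
  | cons x rest ih =>
    intro i s res hpre
    match i with
    | 0 => rfl
    | i' + 1 =>
      obtain ⟨lo, hi, off⟩ := x
      have hhi : hi ≤ s := hpre 0 (by simp) (by omega)
      have hlo : lo < hi := by simpa using hlt (lo, hi, off) (by simp)
      simp only [List.drop_succ_cons]
      by_cases hloe : lo < e
      · have hab : ¬ ((if lo > s then lo else s) : Int) < (if hi < e then hi else e) := by
          split_ifs <;> omega
        simp only [scanRun]
        rw [if_pos hloe, if_neg hab]
        refine (ih (List.pairwise_cons.mp hch).2
          (fun y hy => hlt y (List.mem_cons_of_mem _ hy)) i' s res ?_)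
        intro k hk hki
        exact hpre (k + 1) (by simpa using Nat.succ_lt_succ hk) (by omega)
      · simp only [scanRun]
        rw [if_neg hloe]
        cases hdrop : List.drop i' rest with
        | nil => simp [scanRun]
        | cons y ys =>
          have hy : y ∈ rest := List.mem_of_mem_drop (by rw [hdrop]; exact List.mem_cons_self ..)
          have hylo : hi ≤ y.1 := (List.pairwise_cons.mp hch).1 y hy
          obtain ⟨ylo, yhi, yoff⟩ := y
          simp only [scanRun]
          rw [if_neg (by simp at hylo; omega)]

-- accumulator normalisation for A's inner loop
theorem applyMapInner_acc (m : List (Int × Int × Int)) :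
    ∀ (s l : Int) (t : List (Int × Int)),
      applyMapInner m s l t =
        ((applyMapInner m s l []).1, (applyMapInner m s l []).2.1,
          t ++ (applyMapInner m s l []).2.2) := by
  induction m with
  | nil => intro s l t; simp [applyMapInner]
  | cons hd rest ih =>
    intro s l t
    obtain ⟨dest, src, rl⟩ := hd
    cases hfi : findIntersection s l src rl with
    | none => simp only [applyMapInner, hfi]; exact ih s l t
    | some p =>
      obtain ⟨is, irl⟩ := p
      simp only [applyMapInner, hfi]
      split_ifs with hne hg <;>
      · conv_lhs => rw [ih]
        conv_rhs => rw [ih]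
        simp

-- entries whose source start is past the remainder never intersect
theorem applyMapInner_none (m : List (Int × Int × Int)) :
    ∀ (s l : Int) (t : List (Int × Int)), (∀ x ∈ m, s + l ≤ x.2.1) →
      applyMapInner m s l t = (s, l, t) := by
  induction m with
  | nil => intro s l t _; simp [applyMapInner]
  | cons hd rest ih =>
    intro s l t hall
    obtain ⟨dest, src, rl⟩ := hd
    have h1 : s + l ≤ src := hall (dest, src, rl) (by simp)
    have hfi : findIntersection s l src rl = none := by
      simp only [findIntersection]
      rw [if_neg]
      simp only [le_min_iff, max_le_iff, not_and, not_le]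
      omega
    simp only [applyMapInner, hfi]
    exact ih s l t (fun x hx => hall x (by simp [hx]))

-- a non-positive remainder length never intersects anything
theorem applyMapInner_nonpos (m : List (Int × Int × Int)) :
    ∀ (s l : Int) (t : List (Int × Int)), l ≤ 0 → applyMapInner m s l t = (s, l, t) := by
  induction m with
  | nil => intro s l t _; simp [applyMapInner]
  | cons hd rest ih =>
    intro s l t hl
    obtain ⟨dest, src, rl⟩ := hd
    have hfi : findIntersection s l src rl = none := by
      simp only [findIntersection]
      rw [if_neg]
      simp only [le_min_iff, max_le_iff, not_and, not_le]
      omega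
    simp only [applyMapInner, hfi]
    exact ih s l t hl

-- the heart: on a sorted map, walking the compiled disjoint table computes A's inner loop
theorem scan_eq_inner (m : List (Int × Int × Int)) :
    m.Pairwise (fun a b => a.2.1 ≤ b.2.1) →
    ∀ (cov : Option Int) (s l : Int) (res : List (Int × Int)),
      (∀ c, cov = some c → min (s + l) c ≤ s) →
      scanRun (buildSegs m cov []) (s + l) s res =
        ((applyMapInner m s l []).1, res ++ (applyMapInner m s l []).2.2) ∧
      (applyMapInner m s l []).1 + (applyMapInner m s l []).2.1 = s + l := by
  induction m with
  | nil =>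
    intro _ cov s l res _
    simp [buildSegs, scanRun, applyMapInner]
  | cons hd rest ih =>
    intro hp cov s l res hinv
    obtain ⟨d, src, rl⟩ := hd
    have hsrc : ∀ x ∈ rest, src ≤ x.2.1 := (List.pairwise_cons.mp hp).1
    have ih' := ih (List.pairwise_cons.mp hp).2
    simp only [buildSegs]
    have h1 : src ≤ covLo cov src := by
      cases cov with
      | none => simp [covLo]
      | some c => simp only [covLo]; split_ifs <;> omega
    have h2 : min (s + l) (covLo cov src) ≤ max s src := by
      cases cov with
      | none => simp only [covLo]; omega
      | some c =>
        have := hinv c rfl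
        simp only [covLo]
        split_ifs <;> omega
    generalize hg : covLo cov src = lo0 at h1 h2 ⊢
    split_ifs with hne
    · -- effective segment nonempty
      rw [buildSegs_acc, List.nil_append, List.singleton_append]
      simp only [scanRun]
      by_cases hloe : lo0 < s + l
      · rw [if_pos hloe]
        by_cases hab : ((if lo0 > s then lo0 else s) : Int) < (if src + rl < s + l then src + rl else s + l)
        · -- emitting case
          rw [if_pos hab]
          have ha : ((if lo0 > s then lo0 else s) : Int) = max s src := by
            split_ifs <;> omega
          have hb : ((if src + rl < s + l then src + rl else s + l) : Int) = min (s + l) (src + rl) := by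
            split_ifs <;> omega
          rw [ha, hb] at hab ⊢
          have hfi : findIntersection s l src rl =
              some (max s src, min (s + l - 1) (src + rl - 1) - max s src + 1) := by
            simp only [findIntersection]
            rw [if_pos (by omega)]
          simp only [applyMapInner, hfi]
          have hirl : min (s + l - 1) (src + rl - 1) - max s src + 1 =
              min (s + l) (src + rl) - max s src := by omega
          rw [hirl]
          by_cases hgt : max s src > s
          · have hne2 : max s src ≠ s := by omega
            rw [if_pos hne2, if_pos (by omega : max s src - s > 0), if_pos hgt]
            simp only
            rw [show s + (max s src - s) = max s src by omega]
            rw [show max s src + (min (s + l) (src + rl) - max s src) =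
                  min (s + l) (src + rl) by omega]
            rw [show l - (max s src - s) - (min (s + l) (src + rl) - max s src) =
                  s + l - min (s + l) (src + rl) by omega]
            rw [show d + max s src - src = max s src + (d - src) by omega]
            rw [applyMapInner_acc]
            have hkey := ih' (some (src + rl)) (min (s + l) (src + rl))
              (s + l - min (s + l) (src + rl))
              ((res ++ [(s, max s src - s)]) ++ [(max s src + (d - src),
                min (s + l) (src + rl) - max s src)])
              (by intro c hc; injection hc with hc; omega)
            rw [show min (s + l) (src + rl) + (s + l - min (s + l) (src + rl)) = s + l by omega]
              at hkey
            refine ⟨hkey.1.trans ?_, by dsimp only; exact hkey.2⟩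
            simp
          · have hne2 : ¬ max s src ≠ s := by omega
            rw [if_neg hne2, if_neg hgt]
            simp only
            rw [show s + (min (s + l) (src + rl) - max s src) = min (s + l) (src + rl) by omega]
            rw [show l - (min (s + l) (src + rl) - max s src) =
                  s + l - min (s + l) (src + rl) by omega]
            rw [show d + s - src = max s src + (d - src) by omega]
            rw [applyMapInner_acc]
            have hkey := ih' (some (src + rl)) (min (s + l) (src + rl))
              (s + l - min (s + l) (src + rl))
              (res ++ [(max s src + (d - src), min (s + l) (src + rl) - max s src)])
              (by intro c hc; injection hc with hc; omega)
            rw [show min (s + l) (src + rl) + (s + l - min (s + l) (src + rl)) = s + l by omega]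
              at hkey
            refine ⟨hkey.1.trans ?_, by dsimp only; exact hkey.2⟩
            simp
        · -- clip empty: skip this segment
          rw [if_neg hab]
          have has : ((if lo0 > s then lo0 else s) : Int) = s := by
            split_ifs with h <;> [skip; rfl]
            exfalso
            have hb1 : lo0 < (if src + rl < s + l then src + rl else s + l) := by
              split_ifs <;> omega
            omega
          rw [has] at hab
          have hbs : min (s + l) (src + rl) ≤ s := by
            split_ifs at hab <;> omega
          have hfi : findIntersection s l src rl = none := by
            simp only [findIntersection]
            rw [if_neg]
            simp only [le_min_iff, max_le_iff, not_and, not_le]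
            omega
          simp only [applyMapInner, hfi]
          exact ih' (some (src + rl)) s l res (by intro c hc; injection hc with hc; omega)
      · -- lo0 past the interval end: walk stops, nothing left to map
        rw [if_neg hloe]
        have hstop : applyMapInner ((d, src, rl) :: rest) s l [] = (s, l, []) := by
          by_cases hl : l ≤ 0
          · exact applyMapInner_nonpos _ s l [] hl
          · refine applyMapInner_none _ s l [] ?_
            intro x hx
            have hsx : s + l ≤ src := by omega
            rcases List.mem_cons.mp hx with hx1 | hx1
            · subst hx1; exact hsx
            · exact le_trans hsx (hsrc x hx1)
        rw [hstop]
        simp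
    · -- effective segment empty: entry never intersects
      have hfi : findIntersection s l src rl = none := by
        simp only [findIntersection]
        rw [if_neg]
        simp only [le_min_iff, max_le_iff, not_and, not_le]
        omega
      simp only [applyMapInner, hfi]
      exact ih' cov s l res hinv

theorem fold_eq (cur : List (Int × Int)) :
    ∀ (res : List (Int × Int)) (m0 : List (Int × Int × Int)),
      (cur.foldl
        (fun (st : List (Int × Int) × List (Int × Int × Int)) c =>
          let m := PySem.List.sorted st.2 (fun x => x.2.1) false
          let r := applyMapInner m c.1 c.2 []
          (st.1 ++ (r.2.2 ++ (if r.2.1 > 0 then [(r.1, r.2.1)] else [])), m))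
        (res, m0)).1 =
      cur.foldl
        (fun res c =>
          if c.2 ≤ 0 then res
          else
            let e := c.1 + c.2
            let segs := buildSegs (PySem.List.sorted m0 (fun x => x.2.1) false) none []
            let i := firstOverlap segs c.1 segs.length 0 segs.length
            let r := scanRun (segs.drop i) e c.1 res
            if e - r.1 > 0 then r.2 ++ [(r.1, e - r.1)] else r.2)
        res := by
  induction cur with
  | nil => intro res m0; simp
  | cons c cs ih =>
    intro res m0
    simp only [List.foldl_cons]
    have hsi : PySem.List.sorted (PySem.List.sorted m0 (fun x => x.2.1) false)
        (fun x => x.2.1) false = PySem.List.sorted m0 (fun x => x.2.1) false :=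
      PySem.List.sorted_sorted m0 (fun x => x.2.1)
    rw [ih _ (PySem.List.sorted m0 (fun x => x.2.1) false), hsi]
    congr 1
    by_cases hc2 : c.2 ≤ 0
    · rw [if_pos hc2]
      rw [applyMapInner_nonpos _ c.1 c.2 [] hc2]
      simp only
      rw [if_neg (by omega : ¬ c.2 > 0)]
      simp
    · rw [if_neg hc2]
      have hpair : (PySem.List.sorted m0 (fun x => x.2.1) false).Pairwise
          (fun a b => a.2.1 ≤ b.2.1) := PySem.List.sorted_pairwise m0 (fun x => x.2.1)
      obtain ⟨hchain, hmem⟩ :=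
        buildSegs_chain (PySem.List.sorted m0 (fun x => x.2.1) false) none
      have hlt : ∀ x ∈ buildSegs (PySem.List.sorted m0 (fun x => x.2.1) false) none [],
          x.1 < x.2.1 := fun x hx => (hmem x hx).1
      have hmono := chain_hi_mono _ hchain hlt
      have hfo := firstOverlap_prop _ c.1 hmono
        (buildSegs (PySem.List.sorted m0 (fun x => x.2.1) false) none []).length 0
        (buildSegs (PySem.List.sorted m0 (fun x => x.2.1) false) none []).length
        (by intro k hk h0; omega)
      have hskip := scanRun_skip (c.1 + c.2) _ hchain hlt
        (firstOverlap (buildSegs (PySem.List.sorted m0 (fun x => x.2.1) false) none [])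
          c.1 (buildSegs (PySem.List.sorted m0 (fun x => x.2.1) false) none []).length
          0 (buildSegs (PySem.List.sorted m0 (fun x => x.2.1) false) none []).length)
        c.1 res hfo
      have hmain := scan_eq_inner (PySem.List.sorted m0 (fun x => x.2.1) false) hpair
        none c.1 c.2 res (by intro c' hc'; cases hc')
      have hsum := hmain.2
      rw [← hskip, hmain.1]
      by_cases hpos : (applyMapInner (PySem.List.sorted m0 (fun x => x.2.1) false)
          c.1 c.2 []).2.1 > 0
      · rw [if_pos hpos]
        rw [if_pos (by dsimp only; omega : (c.1 + c.2 -
          ((applyMapInner (PySem.List.sorted m0 (fun x => x.2.1) false) c.1 c.2 []).1,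
            res ++ (applyMapInner (PySem.List.sorted m0 (fun x => x.2.1) false) c.1 c.2 []).2.2).1
          > 0))]
        dsimp only
        rw [show c.1 + c.2 -
            (applyMapInner (PySem.List.sorted m0 (fun x => x.2.1) false) c.1 c.2 []).1 =
            (applyMapInner (PySem.List.sorted m0 (fun x => x.2.1) false) c.1 c.2 []).2.1
          by omega]
        simp
      · rw [if_neg hpos]
        rw [if_neg (by dsimp only; omega : ¬ (c.1 + c.2 -
          ((applyMapInner (PySem.List.sorted m0 (fun x => x.2.1) false) c.1 c.2 []).1,
            res ++ (applyMapInner (PySem.List.sorted m0 (fun x => x.2.1) false) c.1 c.2 []).2.2).1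
          > 0))]
        simp

-- ===== VERDICT (by name: the statement is the Claim_ definition above) =====
theorem apply_map_2_spec : Claim_equal_apply_map_2 := by
  intro current _map _
  unfold Spec_apply_map_2 apply_map_2 apply_map_2_alt
  exact fold_eq current [] _map
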